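-- pv_equiv track=rewrite | github.com/Mashulkin/fanteam_stats | ftStats.py | get_realTeams
-- ===== SOURCE A (Python) =====
-- def get_realTeams(players_data, realTeamId, realTeamId_rival):
--     """Getting team name and abbreviation by ID in database"""
--     teamName, abbr, teamName_rival, abbr_rival = ['', '', '', '']
--     for team in players_data:
--         if team.get('id') == realTeamId:
--             teamName = team.get('name')
--             abbr = team.get('abbr')
--         if team.get('id') == realTeamId_rival:
--             teamName_rival = team.get('name')
--             abbr_rival = team.get('abbr')
--     # bug on the fanteam
--     abbr = 'AVL' if abbr == 'AV' else abbr
--     abbr_rival = 'AVL' if abbr_rival == 'AV' else abbr_rival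
--     abbr = 'SHU' if abbr == 'SUN' else abbr
--     abbr_rival = 'SHU' if abbr_rival == 'SUN' else abbr_rival
--     return teamName, abbr, teamName_rival, abbr_rival
-- ===== SOURCE B (Python) =====
-- def get_realTeams(players_data, realTeamId, realTeamId_rival):
--     """Getting team name and abbreviation by ID in database"""
--     # last forward match == first match scanning backwards: scan reversed, stop early
--     def lookup(tid):
--         for team in reversed(players_data):
--             if team.get('id') == tid:
--                 return team.get('name'), team.get('abbr')
--         return '', ''
--     # bug on the fanteam
--     def fix(ab):
--         return {'AV': 'AVL', 'SUN': 'SHU'}.get(ab, ab)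
--     teamName, abbr = lookup(realTeamId)
--     teamName_rival, abbr_rival = lookup(realTeamId_rival)
--     return teamName, fix(abbr), teamName_rival, fix(abbr_rival)
-- ===== Notes on version B (the rewrite author's own statement) =====
-- stated objective: alternative
-- what changed: Replaces the single forward scan with two overwrite branches by a per-id backward scan with early exit (first match in reverse = last match forward) and a table-driven abbreviation fix-up.
-- outside the precondition, e.g. on get_realTeams([{'id': '1'}], '1', '2'): A returns (None, None, '', ''), B returns (None, None, '', '')
import Mathlib
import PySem

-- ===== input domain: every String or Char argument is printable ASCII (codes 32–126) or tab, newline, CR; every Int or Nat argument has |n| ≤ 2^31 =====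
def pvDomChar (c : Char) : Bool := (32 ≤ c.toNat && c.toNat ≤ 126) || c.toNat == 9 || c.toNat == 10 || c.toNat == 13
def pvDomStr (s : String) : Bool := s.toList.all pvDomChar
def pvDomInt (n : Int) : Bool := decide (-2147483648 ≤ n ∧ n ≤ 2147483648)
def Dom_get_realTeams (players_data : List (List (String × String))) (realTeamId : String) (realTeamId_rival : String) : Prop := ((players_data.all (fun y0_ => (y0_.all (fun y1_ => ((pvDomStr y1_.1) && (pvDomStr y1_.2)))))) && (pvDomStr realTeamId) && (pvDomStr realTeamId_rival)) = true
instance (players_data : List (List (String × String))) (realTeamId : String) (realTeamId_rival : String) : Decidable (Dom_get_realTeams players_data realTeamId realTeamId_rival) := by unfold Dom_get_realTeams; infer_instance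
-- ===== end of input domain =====

-- B replaces A's single forward scan with overwrite branches by a per-id backward scan with early exit plus a table-driven abbreviation fix-up (alternative; same cost).


-- ===== PORT A =====
-- shared helper: team.get(k) on a Python dict given as an assoc list (first match)
def pvDget (team : List (String × String)) (k : String) : Option String :=
  (PySem.Dict.mk team).get? k

-- A's fix-ups after the loop (two successive conditional rewrites); `.getD ""` realises the Pre_-guaranteed String value
def pvFixA (ab : String) : String :=
  let ab := if ab = "AV" then "AVL" else ab
  if ab = "SUN" then "SHU" else ab

def get_realTeams (players_data : List (List (String × String))) (realTeamId : String) (realTeamId_rival : String) : String × String × String × String :=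
  let s := players_data.foldl (fun (st : String × String × String × String) team =>
    let st := if pvDget team "id" = some realTeamId then
        ((pvDget team "name").getD "", (pvDget team "abbr").getD "", st.2.2.1, st.2.2.2) else st
    if pvDget team "id" = some realTeamId_rival then
        (st.1, st.2.1, (pvDget team "name").getD "", (pvDget team "abbr").getD "") else st)
    ("", "", "", "")
  (s.1, pvFixA s.2.1, s.2.2.1, pvFixA s.2.2.2)

-- ===== PORT B =====
-- B's lookup: first match scanning the reversed list, early exit
def pvLookup (tid : String) : List (List (String × String)) → String × String
  | [] => ("", "")
  | team :: rest =>
      if pvDget team "id" = some tid then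
        ((pvDget team "name").getD "", (pvDget team "abbr").getD "")
      else pvLookup tid rest

-- B's table-driven fix-up: {'AV': 'AVL', 'SUN': 'SHU'}.get(ab, ab)
def pvFixB (ab : String) : String :=
  (PySem.Dict.mk [("AV", "AVL"), ("SUN", "SHU")]).getD ab ab

def get_realTeams_alt (players_data : List (List (String × String))) (realTeamId : String) (realTeamId_rival : String) : String × String × String × String :=
  let p := pvLookup realTeamId players_data.reverse
  let q := pvLookup realTeamId_rival players_data.reverse
  (p.1, pvFixB p.2, q.1, pvFixB q.2)

-- ===== PRECONDITION & SPEC =====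
-- Pre_ excludes inputs on which a matched team lacks the 'name' or 'abbr' key: there Python A
-- returns None, which is not a value of the declared String type (B returns the same None).
def Pre_get_realTeams (players_data : List (List (String × String))) (realTeamId : String) (realTeamId_rival : String) : Prop :=
  ∀ team ∈ players_data,
    (pvDget team "id" = some realTeamId ∨ pvDget team "id" = some realTeamId_rival) →
    ((pvDget team "name").isSome ∧ (pvDget team "abbr").isSome)
instance (players_data : List (List (String × String))) (realTeamId : String) (realTeamId_rival : String) : Decidable (Pre_get_realTeams players_data realTeamId realTeamId_rival) := by unfold Pre_get_realTeams; infer_instance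

def pvWitness_get_realTeams : (List (List (String × String))) × String × String :=
  ([[("id", "1"), ("name", "Villa"), ("abbr", "AV")], [("id", "2"), ("name", "United"), ("abbr", "SUN")]], "1", "2")

def Spec_get_realTeams (players_data : List (List (String × String))) (realTeamId : String) (realTeamId_rival : String) (out : String × String × String × String) : Prop := out = get_realTeams_alt players_data realTeamId realTeamId_rival
instance (players_data : List (List (String × String))) (realTeamId : String) (realTeamId_rival : String) (out : String × String × String × String) : Decidable (Spec_get_realTeams players_data realTeamId realTeamId_rival out) := by unfold Spec_get_realTeams; infer_instance

-- ===== CLAIM (what is proved, stated in full; the proofs are below) =====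
def Claim_equal_get_realTeams : Prop := ∀ (players_data : List (List (String × String))) (realTeamId : String) (realTeamId_rival : String), Dom_get_realTeams players_data realTeamId realTeamId_rival → Pre_get_realTeams players_data realTeamId realTeamId_rival → Spec_get_realTeams players_data realTeamId realTeamId_rival (get_realTeams players_data realTeamId realTeamId_rival)

-- ===== LEMMAS AND PROOFS =====

-- the two conditional rewrites of A equal B's table lookup
lemma pvFix_eq (ab : String) : pvFixA ab = pvFixB ab := by
  unfold pvFixA pvFixB
  by_cases h1 : ab = "AV"
  · subst h1; decide
  · by_cases h2 : ab = "SUN"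
    · subst h2; decide
    · simp [h1, h2, PySem.Dict.getD, PySem.Dict.get?,
        show ("AV" == ab) = false by simpa using fun h => h1 h.symm,
        show ("SUN" == ab) = false by simpa using fun h => h2 h.symm]

-- A's foldl over the forward list equals B's first-match lookups on the reversed list
lemma pvLoop_eq_lookup (tid rid : String) : ∀ (pd : List (List (String × String))),
    pd.foldl (fun (st : String × String × String × String) team =>
      let st := if pvDget team "id" = some tid then
          ((pvDget team "name").getD "", (pvDget team "abbr").getD "", st.2.2.1, st.2.2.2) else st
      if pvDget team "id" = some rid then
          (st.1, st.2.1, (pvDget team "name").getD "", (pvDget team "abbr").getD "") else st)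
      ("", "", "", "")
    = ((pvLookup tid pd.reverse).1, (pvLookup tid pd.reverse).2,
       (pvLookup rid pd.reverse).1, (pvLookup rid pd.reverse).2) := by
  intro pd
  induction pd using List.reverseRecOn with
  | nil => simp [pvLookup]
  | append_singleton xs t ih =>
    simp only [List.foldl_append, List.foldl_cons, List.foldl_nil, ih,
      List.reverse_append, List.reverse_cons, List.reverse_nil, List.nil_append,
      List.singleton_append, pvLookup]
    by_cases h1 : pvDget t "id" = some tid
    · by_cases h2 : pvDget t "id" = some rid
      · have h3 : tid = rid := by rw [h1] at h2; exact Option.some.inj h2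
        subst h3; simp [h1]
      · have h3 : ¬ tid = rid := fun h => h2 (h ▸ h1)
        simp [h1, h3]
    · by_cases h2 : pvDget t "id" = some rid
      · have h4 : ¬ rid = tid := fun h => h1 (h ▸ h2)
        simp [h2, h4]
      · simp [h1, h2]

-- ===== VERDICT (by name: the statement is the Claim_ definition above) =====
theorem get_realTeams_spec : Claim_equal_get_realTeams := by
  intro pd tid rid _ _
  unfold Spec_get_realTeams get_realTeams get_realTeams_alt
  rw [pvLoop_eq_lookup]
  simp [pvFix_eq]
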